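-- pv_equiv track=rewrite | github.com/Hello1Robot/python_algorithm | algorithm/프로그래머스/lv2/lv2_거리두기 확인하기.py | BFS
-- ===== SOURCE A (Python) =====
-- dr = [(0,1),(1,0),(0,-1),(-1,0)]
--
-- def BFS(field):
--     que = []
--     for i in range(5):
--         for j in range(5):
--             if field[i][j] == 'P':
--                 que.append((i,j,-1))
--     level = 0
--     while que and level < 2:
--         new_que = []
--         for x,y,d in que:
--             for i in range(4):
--                 if d == i:
--                     continue
--                 nx, ny = x+dr[i][0], y+dr[i][1]
--                 if nx >= 5 or nx < 0 or ny >= 5 or ny < 0: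
--                     continue
--                 if field[nx][ny] == 'P':
--                     return 0
--                 if field[nx][ny] == 'O':
--                     new_que.append((nx,ny,(i+2)%4))
--         level+=1
--         que = new_que
--
--     return 1
-- ===== SOURCE B (Python) =====
-- def BFS(field):
--     for i in range(5):
--         for j in range(5):
--             if field[i][j] != 'P':
--                 continue
--             for di, dj in ((0, 1), (1, 0), (0, -1), (-1, 0)):
--                 ni, nj = i + di, j + dj
--                 if 0 <= ni < 5 and 0 <= nj < 5 and field[ni][nj] == 'P':
--                     return 0
--             for di, dj in ((0, 2), (2, 0), (0, -2), (-2, 0)):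
--                 ni, nj = i + di, j + dj
--                 if 0 <= ni < 5 and 0 <= nj < 5 and field[ni][nj] == 'P' \
--                         and field[i + di // 2][j + dj // 2] == 'O':
--                     return 0
--             for di in (-1, 1):
--                 for dj in (-1, 1):
--                     ni, nj = i + di, j + dj
--                     if 0 <= ni < 5 and 0 <= nj < 5 and field[ni][nj] == 'P' \
--                             and (field[ni][j] == 'O' or field[i][nj] == 'O'):
--                         return 0
--     return 1
-- ===== Notes on version B (the rewrite author's own statement) =====
-- stated objective: alternative
-- what changed: Replaces the two-level BFS queue expansion (all P seeds expanded breadth-first with back-direction exclusion) by a direct fixed-pattern scan: for each 'P' cell it checks its 4 adjacent cells, the 4 straight two-away cells through an 'O', and the 4 diagonal cells with an 'O' connector.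
import Mathlib
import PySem

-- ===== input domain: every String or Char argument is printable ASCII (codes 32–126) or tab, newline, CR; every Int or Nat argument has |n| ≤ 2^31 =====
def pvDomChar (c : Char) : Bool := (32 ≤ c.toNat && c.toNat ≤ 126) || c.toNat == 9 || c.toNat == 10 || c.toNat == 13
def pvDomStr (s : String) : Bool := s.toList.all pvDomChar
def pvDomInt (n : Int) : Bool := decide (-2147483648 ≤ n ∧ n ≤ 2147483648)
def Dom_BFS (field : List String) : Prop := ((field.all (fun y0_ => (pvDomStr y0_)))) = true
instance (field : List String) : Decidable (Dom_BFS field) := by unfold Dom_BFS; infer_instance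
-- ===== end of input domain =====

-- B checks each 'P' cell's fixed distance-≤2 footprint directly (adjacent, straight two-away
-- with an 'O' between, diagonal with an 'O' connector) instead of A's queue-based BFS levels.

-- field[i][j] (raises excluded by Pre_BFS; both Pythons index identically)
def pvCell (field : List String) (i j : Int) : Option Char :=
  (PySem.List.pyGet? field i).bind (fun s => PySem.Str.pyGet? s j)

-- ===== PORT A =====
def pvDr : List (Int × Int) := [(0,1),(1,0),(0,-1),(-1,0)]

def pvInitQue (field : List String) : List (Int × Int × Int) :=
  (PySem.List.pyRange 0 5 1).foldl (fun acc i =>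
    (PySem.List.pyRange 0 5 1).foldl (fun acc j =>
      if pvCell field i j = some 'P' then acc ++ [(i, j, -1)] else acc) acc) []

-- one direction of the inner `for i in range(4)` body; `none` = the Python `return 0`
def pvDirStep (field : List String) (x y d : Int) (idir : Int × Int × Int)
    (st : Option (List (Int × Int × Int))) : Option (List (Int × Int × Int)) :=
  match st with
  | none => none
  | some acc =>
    if d = idir.1 then some acc
    else
      let nx := x + idir.2.1
      let ny := y + idir.2.2
      if 5 ≤ nx ∨ nx < 0 ∨ 5 ≤ ny ∨ ny < 0 then some acc
      else if pvCell field nx ny = some 'P' then none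
      else if pvCell field nx ny = some 'O' then
        some (acc ++ [(nx, ny, PySem.Int.mod (idir.1 + 2) 4)])
      else some acc

def pvQueStep (field : List String) (e : Int × Int × Int)
    (st : Option (List (Int × Int × Int))) : Option (List (Int × Int × Int)) :=
  (PySem.List.enumerate pvDr).foldl
    (fun st idir => pvDirStep field e.1 e.2.1 e.2.2 idir st) st

-- one pass of the while-loop body over `que`; `none` = `return 0`, `some nq` = new_que
def pvStep (field : List String) (que : List (Int × Int × Int)) :
    Option (List (Int × Int × Int)) :=
  que.foldl (fun st e => pvQueStep field e st) (some [])

def pvLoop (field : List String) (que : List (Int × Int × Int)) (level : Nat) : Int :=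
  if _h : que ≠ [] ∧ level < 2 then
    match pvStep field que with
    | none => 0
    | some nq => pvLoop field nq (level + 1)
  else 1
termination_by 2 - level
decreasing_by omega

def BFS (field : List String) : Int := pvLoop field (pvInitQue field) 0

-- ===== PORT B =====
def pvAdjDirs : List (Int × Int) := [(0,1),(1,0),(0,-1),(-1,0)]
def pvStraightDirs : List (Int × Int) := [(0,2),(2,0),(0,-2),(-2,0)]

def pvViolAt (field : List String) (i j : Int) : Bool :=
  (pvAdjDirs.any (fun p =>
      decide (0 ≤ i + p.1 ∧ i + p.1 < 5 ∧ 0 ≤ j + p.2 ∧ j + p.2 < 5 ∧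
        pvCell field (i + p.1) (j + p.2) = some 'P')))
  || (pvStraightDirs.any (fun p =>
      decide (0 ≤ i + p.1 ∧ i + p.1 < 5 ∧ 0 ≤ j + p.2 ∧ j + p.2 < 5 ∧
        pvCell field (i + p.1) (j + p.2) = some 'P' ∧
        pvCell field (i + PySem.Int.floordiv p.1 2) (j + PySem.Int.floordiv p.2 2) = some 'O')))
  || (([(-1 : Int), 1]).any (fun di => ([(-1 : Int), 1]).any (fun dj =>
      decide (0 ≤ i + di ∧ i + di < 5 ∧ 0 ≤ j + dj ∧ j + dj < 5 ∧
        pvCell field (i + di) (j + dj) = some 'P' ∧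
        (pvCell field (i + di) j = some 'O' ∨ pvCell field i (j + dj) = some 'O')))))

def BFS_alt (field : List String) : Int :=
  if (PySem.List.pyRange 0 5 1).any (fun i => (PySem.List.pyRange 0 5 1).any (fun j =>
      decide (pvCell field i j = some 'P') && pvViolAt field i j))
  then 0 else 1

-- ===== PRECONDITION & SPEC =====
-- Pre_ excludes exactly the inputs where the Python raises IndexError (both A and B index
-- field[i][j] for all i,j < 5): fewer than 5 rows, or one of the first 5 rows shorter than 5.
def Pre_BFS (field : List String) : Prop :=
  5 ≤ field.length ∧ ∀ s ∈ field.take 5, 5 ≤ s.toList.length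
instance (field : List String) : Decidable (Pre_BFS field) := by unfold Pre_BFS; infer_instance

def pvWitness_BFS : List String := ["POOOP", "OOOOO", "OOOOO", "OOOOO", "POOOP"]

def Spec_BFS (field : List String) (out : Int) : Prop := out = BFS_alt field
instance (field : List String) (out : Int) : Decidable (Spec_BFS field out) := by unfold Spec_BFS; infer_instance

-- ===== CLAIM (what is proved, stated in full; the proofs are below) =====
def Claim_equal_BFS : Prop := ∀ (field : List String), Dom_BFS field → Pre_BFS field → Spec_BFS field (BFS field)

-- ===== LEMMAS AND PROOFS =====

-- trigger / expansion description of one direction of A's inner loop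
def pvDirTb (field : List String) (x y d : Int) (idir : Int × Int × Int) : Bool :=
  decide (¬ d = idir.1 ∧
    ¬(5 ≤ x + idir.2.1 ∨ x + idir.2.1 < 0 ∨ 5 ≤ y + idir.2.2 ∨ y + idir.2.2 < 0) ∧
    pvCell field (x + idir.2.1) (y + idir.2.2) = some 'P')

def pvDirE (field : List String) (x y d : Int) (idir : Int × Int × Int) : List (Int × Int × Int) :=
  if ¬ d = idir.1 ∧
      ¬(5 ≤ x + idir.2.1 ∨ x + idir.2.1 < 0 ∨ 5 ≤ y + idir.2.2 ∨ y + idir.2.2 < 0) ∧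
      pvCell field (x + idir.2.1) (y + idir.2.2) = some 'O'
  then [(x + idir.2.1, y + idir.2.2, PySem.Int.mod (idir.1 + 2) 4)] else []

def pvTbQ (field : List String) (e : Int × Int × Int) : Bool :=
  (PySem.List.enumerate pvDr).any (fun idir => pvDirTb field e.1 e.2.1 e.2.2 idir)

def pvEQ (field : List String) (e : Int × Int × Int) : List (Int × Int × Int) :=
  (PySem.List.enumerate pvDr).flatMap (fun idir => pvDirE field e.1 e.2.1 e.2.2 idir)

def pvViolA (field : List String) : Bool :=
  (pvInitQue field).any (pvTbQ field) || ((pvInitQue field).flatMap (pvEQ field)).any (pvTbQ field)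

def pvViolB (field : List String) : Bool :=
  (PySem.List.pyRange 0 5 1).any (fun i => (PySem.List.pyRange 0 5 1).any (fun j =>
      decide (pvCell field i j = some 'P') && pvViolAt field i j))

lemma pvFoldNone {α L : Type} (step : α → Option L → Option L)
    (h1 : ∀ e, step e none = none) (l : List α) :
    l.foldl (fun st e => step e st) none = none := by
  induction l with
  | nil => rfl
  | cons e l ih => simp only [List.foldl_cons, h1, ih]

lemma pvFoldGood {α L : Type} (step : α → Option (List L) → Option (List L)) (Tb : α → Bool) (E : α → List L)
    (h1 : ∀ e, step e none = none)
    (h2 : ∀ (e : α) (acc : List L), step e (some acc) = if Tb e = true then none else some (acc ++ E e))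
    (l : List α) (a0 : List L) :
    l.foldl (fun st e => step e st) (some a0) =
      if l.any Tb = true then none else some (a0 ++ l.flatMap E) := by
  induction l generalizing a0 with
  | nil => simp
  | cons e l ih =>
    simp only [List.foldl_cons, h2, List.any_cons, List.flatMap_cons]
    by_cases hT : Tb e = true
    · simp [hT, pvFoldNone step h1 l]
    · rw [if_neg hT, ih (a0 ++ E e)]
      simp only [List.append_assoc]
      congr 1
      simp [hT]

lemma pvDirStep_some (field : List String) (x y d : Int) (idir : Int × Int × Int)
    (acc : List (Int × Int × Int)) :
    pvDirStep field x y d idir (some acc) =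
      if pvDirTb field x y d idir = true then none else some (acc ++ pvDirE field x y d idir) := by
  simp only [pvDirStep, pvDirTb, pvDirE, decide_eq_true_eq]
  split_ifs <;> simp_all

lemma pvQueStep_none (field : List String) (e : Int × Int × Int) :
    pvQueStep field e none = none :=
  pvFoldNone _ (fun _ => rfl) _

lemma pvQueStep_some (field : List String) (e : Int × Int × Int) (acc : List (Int × Int × Int)) :
    pvQueStep field e (some acc) =
      if pvTbQ field e = true then none else some (acc ++ pvEQ field e) := by
  unfold pvQueStep pvTbQ pvEQ
  exact pvFoldGood _ _ _ (fun _ => rfl) (fun idir acc => pvDirStep_some field e.1 e.2.1 e.2.2 idir acc) _ _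

lemma pvStep_eq (field : List String) (que : List (Int × Int × Int)) :
    pvStep field que =
      if que.any (pvTbQ field) = true then none else some (que.flatMap (pvEQ field)) := by
  unfold pvStep
  have := pvFoldGood (fun e st => pvQueStep field e st) (pvTbQ field) (pvEQ field)
    (fun e => pvQueStep_none field e) (fun e acc => pvQueStep_some field e acc) que []
  simpa using this

lemma pvLoop_eq (field : List String) (que : List (Int × Int × Int)) :
    pvLoop field que 0 =
      if que = [] then 1 else
      match pvStep field que with
      | none => 0
      | some q1 =>
        if q1 = [] then 1 else
        match pvStep field q1 with
        | none => 0
        | some _ => 1 := by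
  rw [pvLoop]
  by_cases h : que = []
  · simp [h]
  · rw [dif_pos ⟨h, by omega⟩, if_neg h]
    cases hs : pvStep field que with
    | none => rfl
    | some q1 =>
      simp only
      rw [pvLoop]
      by_cases h1 : q1 = []
      · simp [h1]
      · rw [dif_pos ⟨h1, by omega⟩, if_neg h1]
        cases hs1 : pvStep field q1 with
        | none => rfl
        | some q2 => simp only; rw [pvLoop]; simp

lemma pvBFS_eq (field : List String) : BFS field = if pvViolA field = true then 0 else 1 := by
  unfold BFS pvViolA
  rw [pvLoop_eq]
  by_cases h0 : pvInitQue field = []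
  · simp [h0]
  · rw [if_neg h0, pvStep_eq]
    by_cases hT : (pvInitQue field).any (pvTbQ field) = true
    · simp [hT]
    · rw [if_neg hT]
      simp only
      rw [pvStep_eq]
      by_cases hT2 : ((pvInitQue field).flatMap (pvEQ field)).any (pvTbQ field) = true
      · have hq : ¬ (pvInitQue field).flatMap (pvEQ field) = [] := by
          intro h; rw [h] at hT2; simp at hT2
        rw [if_neg hq, if_pos hT2]
        simp [hT, hT2]
      · rw [if_neg hT2]
        by_cases hq : (pvInitQue field).flatMap (pvEQ field) = []
        · simp [hq, hT]
        · rw [if_neg hq]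
          simp [hT, hT2]

lemma pvBFS_alt_eq (field : List String) :
    BFS_alt field = if pvViolB field = true then 0 else 1 := rfl

lemma pvMem_initQue (field : List String) (e : Int × Int × Int) :
    e ∈ pvInitQue field ↔ ∃ x y : Int, 0 ≤ x ∧ x < 5 ∧ 0 ≤ y ∧ y < 5 ∧
      pvCell field x y = some 'P' ∧ e = (x, y, -1) := by
  have inner : ∀ (i : Int) (acc : List (Int × Int × Int)),
      (PySem.List.pyRange 0 5 1).foldl
        (fun acc j => if pvCell field i j = some 'P' then acc ++ [(i, j, -1)] else acc) acc =
      acc ++ ((PySem.List.pyRange 0 5 1).filter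
        (fun j => decide (pvCell field i j = some 'P'))).map (fun j => (i, j, (-1 : Int))) := by
    intro i acc
    rw [← PySem.List.foldl_append_if (fun j => decide (pvCell field i j = some 'P'))
      (fun j => (i, j, (-1 : Int)))]
    simp only [decide_eq_true_eq]
  unfold pvInitQue
  simp only [inner]
  rw [PySem.List.foldl_append_eq_flatMap]
  simp only [List.nil_append, List.mem_flatMap, List.mem_map, List.mem_filter,
    PySem.List.mem_pyRange_one, decide_eq_true_eq]
  constructor
  · rintro ⟨i, ⟨hi0, hi5⟩, j, ⟨⟨hj0, hj5⟩, hP⟩, he⟩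
    exact ⟨i, j, hi0, hi5, hj0, hj5, hP, he.symm⟩
  · rintro ⟨x, y, hx0, hx5, hy0, hy5, hP, he⟩
    exact ⟨x, ⟨hx0, hx5⟩, y, ⟨⟨hy0, hy5⟩, hP⟩, he.symm⟩

lemma pvViolA_iff (field : List String) : pvViolA field = true ↔
    ∃ x y : Int, 0 ≤ x ∧ x < 5 ∧ 0 ≤ y ∧ y < 5 ∧ pvCell field x y = some 'P' ∧
      (pvTbQ field (x, y, -1) = true ∨ ∃ exp ∈ pvEQ field (x, y, -1), pvTbQ field exp = true) := by
  unfold pvViolA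
  simp only [Bool.or_eq_true, List.any_eq_true, List.mem_flatMap, pvMem_initQue]
  constructor
  · rintro (⟨e, ⟨x, y, hx0, hx5, hy0, hy5, hP, he⟩, hT⟩ |
      ⟨e, ⟨e', ⟨x, y, hx0, hx5, hy0, hy5, hP, he⟩, hm⟩, hT⟩)
    · exact ⟨x, y, hx0, hx5, hy0, hy5, hP, Or.inl (he ▸ hT)⟩
    · exact ⟨x, y, hx0, hx5, hy0, hy5, hP, Or.inr ⟨e, he ▸ hm, hT⟩⟩
  · rintro ⟨x, y, hx0, hx5, hy0, hy5, hP, hT | ⟨exp, hm, hT⟩⟩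
    · exact Or.inl ⟨(x, y, -1), ⟨x, y, hx0, hx5, hy0, hy5, hP, rfl⟩, hT⟩
    · exact Or.inr ⟨exp, ⟨(x, y, -1), ⟨x, y, hx0, hx5, hy0, hy5, hP, rfl⟩, hm⟩, hT⟩

lemma pvViolB_iff (field : List String) : pvViolB field = true ↔
    ∃ x y : Int, 0 ≤ x ∧ x < 5 ∧ 0 ≤ y ∧ y < 5 ∧ pvCell field x y = some 'P' ∧
      pvViolAt field x y = true := by
  unfold pvViolB
  simp only [List.any_eq_true, PySem.List.mem_pyRange_one, Bool.and_eq_true, decide_eq_true_eq]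
  constructor
  · rintro ⟨x, ⟨hx0, hx5⟩, y, ⟨hy0, hy5⟩, hP, hV⟩
    exact ⟨x, y, hx0, hx5, hy0, hy5, hP, hV⟩
  · rintro ⟨x, y, hx0, hx5, hy0, hy5, hP, hV⟩
    exact ⟨x, ⟨hx0, hx5⟩, y, ⟨⟨hy0, hy5⟩, hP, hV⟩⟩

set_option maxHeartbeats 2000000 in
lemma pvCell_iff (field : List String) (x y : Int) (hx0 : 0 ≤ x) (hx5 : x < 5)
    (hy0 : 0 ≤ y) (hy5 : y < 5) (_hP : pvCell field x y = some 'P') :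
    (pvTbQ field (x, y, -1) = true ∨ ∃ exp ∈ pvEQ field (x, y, -1), pvTbQ field exp = true) ↔
      pvViolAt field x y = true := by
  have hdr : PySem.List.enumerate pvDr = [(0,(0,1)),(1,(1,0)),(2,(0,-1)),(3,(-1,0))] := by decide
  unfold pvTbQ pvEQ pvViolAt pvDirTb pvDirE
  rw [hdr]
  simp only [List.any_cons, List.any_nil, List.flatMap_cons, List.flatMap_nil,
    Bool.or_eq_true, decide_eq_true_eq, List.mem_append,
    pvAdjDirs, pvStraightDirs, List.append_nil]
  have m0 : PySem.Int.mod (0+2) 4 = 2 := by decide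
  have m1 : PySem.Int.mod (1+2) 4 = 3 := by decide
  have m2 : PySem.Int.mod (2+2) 4 = 0 := by decide
  have m3 : PySem.Int.mod (3+2) 4 = 1 := by decide
  have f0 : PySem.Int.floordiv 0 2 = 0 := by decide
  have f1 : PySem.Int.floordiv 2 2 = 1 := by decide
  have f2 : PySem.Int.floordiv (-2) 2 = -1 := by decide
  simp only [m0, m1, m2, m3, f0, f1, f2]
  simp [List.mem_ite_nil_right, and_assoc, not_or, not_lt, not_le]
  constructor
  · rintro (h | ⟨a, a1, b, hf, hs⟩)
    · rcases h with ⟨h1,h2,h3,h4,hp⟩ | ⟨h1,h2,h3,h4,hp⟩ | ⟨h1,h2,h3,h4,hp⟩ | ⟨h1,h2,h3,h4,hp⟩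
      · exact Or.inl (Or.inl (Or.inl ⟨by omega, by omega, by omega, by omega, hp⟩))
      · exact Or.inl (Or.inl (Or.inr (Or.inl ⟨by omega, by omega, by omega, by omega, hp⟩)))
      · exact Or.inl (Or.inl (Or.inr (Or.inr (Or.inl ⟨by omega, by omega, by omega, by omega, hp⟩))))
      · exact Or.inl (Or.inl (Or.inr (Or.inr (Or.inr ⟨by omega, by omega, by omega, by omega, hp⟩))))
    · rcases hf with ⟨h1,h2,h3,h4,hO,ha,ha1,hb⟩ | ⟨h1,h2,h3,h4,hO,ha,ha1,hb⟩ |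
        ⟨h1,h2,h3,h4,hO,ha,ha1,hb⟩ | ⟨h1,h2,h3,h4,hO,ha,ha1,hb⟩ <;> rw [ha, ha1, hb] at hs
      · -- first step East: (x, y+1), back = 2
        rcases hs with ⟨-,c1,c2,c3,c4,hp⟩ | ⟨-,c1,c2,c3,c4,hp⟩ | ⟨hd,-⟩ | ⟨-,c1,c2,c3,c4,hp⟩
        · have hp' : pvCell field x (y+2) = some 'P' := by
            rw [show (y:Int)+2 = y+1+1 from by ring]; exact hp
          have hR : 0 ≤ x ∧ x < 5 ∧ 0 ≤ y + 2 ∧ y + 2 < 5 ∧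
              pvCell field x (y+2) = some 'P' ∧ pvCell field x (y+1) = some 'O' :=
            ⟨by omega, by omega, by omega, by omega, hp', hO⟩
          exact Or.inl (Or.inr (Or.inl hR))
        · have hR : 0 ≤ x + 1 ∧ x + 1 < 5 ∧ 0 ≤ y + 1 ∧ y + 1 < 5 ∧
              pvCell field (x+1) (y+1) = some 'P' ∧
              (pvCell field (x+1) y = some 'O' ∨ pvCell field x (y+1) = some 'O') :=
            ⟨by omega, by omega, by omega, by omega, hp, Or.inr hO⟩
          exact Or.inr (Or.inr (Or.inr hR))
        · exact absurd rfl hd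
        · have hR : 1 ≤ x ∧ x < 6 ∧ 0 ≤ y + 1 ∧ y + 1 < 5 ∧
              pvCell field (x + -1) (y+1) = some 'P' ∧
              (pvCell field (x + -1) y = some 'O' ∨ pvCell field x (y+1) = some 'O') :=
            ⟨by omega, by omega, by omega, by omega, hp, Or.inr hO⟩
          exact Or.inr (Or.inl (Or.inr hR))
      · -- first step South: (x+1, y), back = 3
        rcases hs with ⟨-,c1,c2,c3,c4,hp⟩ | ⟨-,c1,c2,c3,c4,hp⟩ | ⟨-,c1,c2,c3,c4,hp⟩ | ⟨hd,-⟩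
        · have hR : 0 ≤ x + 1 ∧ x + 1 < 5 ∧ 0 ≤ y + 1 ∧ y + 1 < 5 ∧
              pvCell field (x+1) (y+1) = some 'P' ∧
              (pvCell field (x+1) y = some 'O' ∨ pvCell field x (y+1) = some 'O') :=
            ⟨by omega, by omega, by omega, by omega, hp, Or.inl hO⟩
          exact Or.inr (Or.inr (Or.inr hR))
        · have hp' : pvCell field (x+2) y = some 'P' := by
            rw [show (x:Int)+2 = x+1+1 from by ring]; exact hp
          have hR : 0 ≤ x + 2 ∧ x + 2 < 5 ∧ 0 ≤ y ∧ y < 5 ∧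
              pvCell field (x+2) y = some 'P' ∧ pvCell field (x+1) y = some 'O' :=
            ⟨by omega, by omega, by omega, by omega, hp', hO⟩
          exact Or.inl (Or.inr (Or.inr (Or.inl hR)))
        · have hR : 0 ≤ x + 1 ∧ x + 1 < 5 ∧ 1 ≤ y ∧ y < 6 ∧
              pvCell field (x+1) (y + -1) = some 'P' ∧
              (pvCell field (x+1) y = some 'O' ∨ pvCell field x (y + -1) = some 'O') :=
            ⟨by omega, by omega, by omega, by omega, hp, Or.inl hO⟩
          exact Or.inr (Or.inr (Or.inl hR))
        · exact absurd rfl hd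
      · -- first step West: (x, y-1), back = 0
        rcases hs with ⟨hd,-⟩ | ⟨-,c1,c2,c3,c4,hp⟩ | ⟨-,c1,c2,c3,c4,hp⟩ | ⟨-,c1,c2,c3,c4,hp⟩
        · exact absurd rfl hd
        · have hR : 0 ≤ x + 1 ∧ x + 1 < 5 ∧ 1 ≤ y ∧ y < 6 ∧
              pvCell field (x+1) (y + -1) = some 'P' ∧
              (pvCell field (x+1) y = some 'O' ∨ pvCell field x (y + -1) = some 'O') :=
            ⟨by omega, by omega, by omega, by omega, hp, Or.inr hO⟩
          exact Or.inr (Or.inr (Or.inl hR))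
        · have hp' : pvCell field x (y + -2) = some 'P' := by
            rw [show (y:Int) + -2 = y + -1 + -1 from by ring]; exact hp
          have hR : 0 ≤ x ∧ x < 5 ∧ 2 ≤ y ∧ y < 7 ∧
              pvCell field x (y + -2) = some 'P' ∧ pvCell field x (y + -1) = some 'O' :=
            ⟨by omega, by omega, by omega, by omega, hp', hO⟩
          exact Or.inl (Or.inr (Or.inr (Or.inr (Or.inl hR))))
        · have hR : 1 ≤ x ∧ x < 6 ∧ 1 ≤ y ∧ y < 6 ∧
              pvCell field (x + -1) (y + -1) = some 'P' ∧
              (pvCell field (x + -1) y = some 'O' ∨ pvCell field x (y + -1) = some 'O') :=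
            ⟨by omega, by omega, by omega, by omega, hp, Or.inr hO⟩
          exact Or.inr (Or.inl (Or.inl hR))
      · -- first step North: (x-1, y), back = 1
        rcases hs with ⟨-,c1,c2,c3,c4,hp⟩ | ⟨hd,-⟩ | ⟨-,c1,c2,c3,c4,hp⟩ | ⟨-,c1,c2,c3,c4,hp⟩
        · have hR : 1 ≤ x ∧ x < 6 ∧ 0 ≤ y + 1 ∧ y + 1 < 5 ∧
              pvCell field (x + -1) (y+1) = some 'P' ∧
              (pvCell field (x + -1) y = some 'O' ∨ pvCell field x (y+1) = some 'O') :=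
            ⟨by omega, by omega, by omega, by omega, hp, Or.inl hO⟩
          exact Or.inr (Or.inl (Or.inr hR))
        · exact absurd rfl hd
        · have hR : 1 ≤ x ∧ x < 6 ∧ 1 ≤ y ∧ y < 6 ∧
              pvCell field (x + -1) (y + -1) = some 'P' ∧
              (pvCell field (x + -1) y = some 'O' ∨ pvCell field x (y + -1) = some 'O') :=
            ⟨by omega, by omega, by omega, by omega, hp, Or.inl hO⟩
          exact Or.inr (Or.inl (Or.inl hR))
        · have hp' : pvCell field (x + -2) y = some 'P' := by
            rw [show (x:Int) + -2 = x + -1 + -1 from by ring]; exact hp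
          have hR : 2 ≤ x ∧ x < 7 ∧ 0 ≤ y ∧ y < 5 ∧
              pvCell field (x + -2) y = some 'P' ∧ pvCell field (x + -1) y = some 'O' :=
            ⟨by omega, by omega, by omega, by omega, hp', hO⟩
          exact Or.inl (Or.inr (Or.inr (Or.inr (Or.inr hR))))
  · rintro ((hadj | ⟨c1,c2,c3,c4,hp,hO⟩ | ⟨c1,c2,c3,c4,hp,hO⟩ | ⟨c1,c2,c3,c4,hp,hO⟩ |
      ⟨c1,c2,c3,c4,hp,hO⟩) | (⟨c1,c2,c3,c4,hp,hO | hO⟩ | ⟨c1,c2,c3,c4,hp,hO | hO⟩) |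
      ⟨c1,c2,c3,c4,hp,hO | hO⟩ | ⟨c1,c2,c3,c4,hp,hO | hO⟩)
    · rcases hadj with ⟨h1,h2,h3,h4,hp⟩ | ⟨h1,h2,h3,h4,hp⟩ | ⟨h1,h2,h3,h4,hp⟩ | ⟨h1,h2,h3,h4,hp⟩
      · exact Or.inl (Or.inl ⟨by omega, by omega, by omega, by omega, hp⟩)
      · exact Or.inl (Or.inr (Or.inl ⟨by omega, by omega, by omega, by omega, hp⟩))
      · exact Or.inl (Or.inr (Or.inr (Or.inl ⟨by omega, by omega, by omega, by omega, hp⟩)))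
      · exact Or.inl (Or.inr (Or.inr (Or.inr ⟨by omega, by omega, by omega, by omega, hp⟩)))
    · -- straight East
      refine Or.inr ⟨x, y+1, 2, Or.inl ⟨by omega, by omega, by omega, by omega, hO, rfl, rfl, rfl⟩,
        Or.inl ⟨by omega, by omega, by omega, by omega, by omega, ?_⟩⟩
      rw [show (y:Int)+1+1 = y+2 from by ring]; exact hp
    · -- straight South
      refine Or.inr ⟨x+1, y, 3, Or.inr (Or.inl ⟨by omega, by omega, by omega, by omega, hO, rfl, rfl, rfl⟩),
        Or.inr (Or.inl ⟨by omega, by omega, by omega, by omega, by omega, ?_⟩)⟩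
      rw [show (x:Int)+1+1 = x+2 from by ring]; exact hp
    · -- straight West
      refine Or.inr ⟨x, y + -1, 0, Or.inr (Or.inr (Or.inl ⟨by omega, by omega, by omega, by omega, hO, rfl, rfl, rfl⟩)),
        Or.inr (Or.inr (Or.inl ⟨by omega, by omega, by omega, by omega, by omega, ?_⟩))⟩
      rw [show (y:Int) + -1 + -1 = y + -2 from by ring]; exact hp
    · -- straight North
      refine Or.inr ⟨x + -1, y, 1, Or.inr (Or.inr (Or.inr ⟨by omega, by omega, by omega, by omega, hO, rfl, rfl, rfl⟩)),
        Or.inr (Or.inr (Or.inr ⟨by omega, by omega, by omega, by omega, by omega, ?_⟩))⟩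
      rw [show (x:Int) + -1 + -1 = x + -2 from by ring]; exact hp
    · -- diag (x-1, y-1), connector (x-1, y): North then West
      exact Or.inr ⟨x + -1, y, 1, Or.inr (Or.inr (Or.inr ⟨by omega, by omega, by omega, by omega, hO, rfl, rfl, rfl⟩)),
        Or.inr (Or.inr (Or.inl ⟨by omega, by omega, by omega, by omega, by omega, hp⟩))⟩
    · -- diag (x-1, y-1), connector (x, y-1): West then North
      exact Or.inr ⟨x, y + -1, 0, Or.inr (Or.inr (Or.inl ⟨by omega, by omega, by omega, by omega, hO, rfl, rfl, rfl⟩)),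
        Or.inr (Or.inr (Or.inr ⟨by omega, by omega, by omega, by omega, by omega, hp⟩))⟩
    · -- diag (x-1, y+1), connector (x-1, y): North then East
      exact Or.inr ⟨x + -1, y, 1, Or.inr (Or.inr (Or.inr ⟨by omega, by omega, by omega, by omega, hO, rfl, rfl, rfl⟩)),
        Or.inl ⟨by omega, by omega, by omega, by omega, by omega, hp⟩⟩
    · -- diag (x-1, y+1), connector (x, y+1): East then North
      exact Or.inr ⟨x, y+1, 2, Or.inl ⟨by omega, by omega, by omega, by omega, hO, rfl, rfl, rfl⟩,
        Or.inr (Or.inr (Or.inr ⟨by omega, by omega, by omega, by omega, by omega, hp⟩))⟩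
    · -- diag (x+1, y-1), connector (x+1, y): South then West
      exact Or.inr ⟨x+1, y, 3, Or.inr (Or.inl ⟨by omega, by omega, by omega, by omega, hO, rfl, rfl, rfl⟩),
        Or.inr (Or.inr (Or.inl ⟨by omega, by omega, by omega, by omega, by omega, hp⟩))⟩
    · -- diag (x+1, y-1), connector (x, y-1): West then South
      exact Or.inr ⟨x, y + -1, 0, Or.inr (Or.inr (Or.inl ⟨by omega, by omega, by omega, by omega, hO, rfl, rfl, rfl⟩)),
        Or.inr (Or.inl ⟨by omega, by omega, by omega, by omega, by omega, hp⟩)⟩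
    · -- diag (x+1, y+1), connector (x+1, y): South then East
      exact Or.inr ⟨x+1, y, 3, Or.inr (Or.inl ⟨by omega, by omega, by omega, by omega, hO, rfl, rfl, rfl⟩),
        Or.inl ⟨by omega, by omega, by omega, by omega, by omega, hp⟩⟩
    · -- diag (x+1, y+1), connector (x, y+1): East then South
      exact Or.inr ⟨x, y+1, 2, Or.inl ⟨by omega, by omega, by omega, by omega, hO, rfl, rfl, rfl⟩,
        Or.inr (Or.inl ⟨by omega, by omega, by omega, by omega, by omega, hp⟩)⟩

lemma pvViol_iff (field : List String) : pvViolA field = true ↔ pvViolB field = true := by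
  rw [pvViolA_iff, pvViolB_iff]
  constructor
  · rintro ⟨x, y, hx0, hx5, hy0, hy5, hP, h⟩
    exact ⟨x, y, hx0, hx5, hy0, hy5, hP, (pvCell_iff field x y hx0 hx5 hy0 hy5 hP).mp h⟩
  · rintro ⟨x, y, hx0, hx5, hy0, hy5, hP, h⟩
    exact ⟨x, y, hx0, hx5, hy0, hy5, hP, (pvCell_iff field x y hx0 hx5 hy0 hy5 hP).mpr h⟩

-- ===== VERDICT (by name: the statement is the Claim_ definition above) =====
theorem BFS_spec : Claim_equal_BFS := by
  intro field _ _
  unfold Spec_BFS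
  rw [pvBFS_eq, pvBFS_alt_eq]
  by_cases h : pvViolA field = true
  · simp [h, (pvViol_iff field).mp h]
  · have hB : ¬ pvViolB field = true := fun hb => h ((pvViol_iff field).mpr hb)
    simp [h, hB]
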